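-- pv_equiv track=rewrite | github.com/Devanshshah1309/leetcode | Easy/TwoSum.py | Find
-- ===== SOURCE A (Python) =====
-- from typing import List
--
-- def Find(arr: List[int], x: int, y: int):
--     i: int = -1
--     j: int = -1
--     for k in range(len(arr)):
--         if (arr[k] == x and i == -1):
--             i = k
--         if (arr[k] == y and j == -1 and i != k):
--             j = k
--     return [i, j]
-- ===== SOURCE B (Python) =====
-- def Find(arr, x, y):
--     i = next((k for k, v in enumerate(arr) if v == x), -1)
--     j = next((k for k, v in enumerate(arr) if v == y and k != i), -1)
--     return [i, j]
-- ===== Notes on version B (the rewrite author's own statement) =====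
-- stated objective: idiomatic
-- what changed: Replaces A's single fused index loop carrying two sentinel accumulators with two independent first-match searches (next over enumerate), the second excluding the first x-index.
import Mathlib
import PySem

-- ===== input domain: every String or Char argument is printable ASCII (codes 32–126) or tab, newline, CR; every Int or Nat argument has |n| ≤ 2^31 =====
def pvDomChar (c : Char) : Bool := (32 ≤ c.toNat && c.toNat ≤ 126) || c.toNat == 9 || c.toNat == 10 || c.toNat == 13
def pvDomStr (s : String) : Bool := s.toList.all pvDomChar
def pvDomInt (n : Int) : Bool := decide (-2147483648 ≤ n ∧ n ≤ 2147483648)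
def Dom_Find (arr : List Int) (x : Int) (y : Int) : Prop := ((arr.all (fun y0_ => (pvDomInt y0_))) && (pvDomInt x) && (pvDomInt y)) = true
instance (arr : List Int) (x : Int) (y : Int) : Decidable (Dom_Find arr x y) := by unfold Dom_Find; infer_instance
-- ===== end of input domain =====

-- B replaces A's one fused stateful index loop by two independent first-match searches (idiomatic; same cost).

-- ===== PORT A =====
-- loop body of A's single for-loop (the two guarded assignments, in order)
def FindStep (x y : Int) (ij : Int × Int) (k v : Int) : Int × Int :=
  let i' := if v == x && ij.1 == -1 then k else ij.1
  let j' := if v == y && ij.2 == -1 && i' != k then k else ij.2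
  (i', j')

def Find (arr : List Int) (x : Int) (y : Int) : List Int :=
  let p := (PySem.List.pyRange 0 (arr.length) 1).foldl
    (fun ij k => FindStep x y ij k (PySem.List.pyGetD arr k 0)) (-1, -1)
  [p.1, p.2]

-- ===== PORT B =====
-- first index k (counting from k0) with p k v true, else -1  (= next((k for k,v in enumerate(arr) if p), -1))
def findIdxFrom : List Int → Int → (Int → Int → Bool) → Int
  | [], _, _ => -1
  | v :: t, k, p => if p k v then k else findIdxFrom t (k + 1) p

def Find_alt (arr : List Int) (x : Int) (y : Int) : List Int :=
  let i := findIdxFrom arr 0 (fun _ v => v == x)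
  let j := findIdxFrom arr 0 (fun k v => v == y && k != i)
  [i, j]

-- ===== PRECONDITION & SPEC =====
def Spec_Find (arr : List Int) (x : Int) (y : Int) (out : List Int) : Prop := out = Find_alt arr x y
instance (arr : List Int) (x : Int) (y : Int) (out : List Int) : Decidable (Spec_Find arr x y out) := by unfold Spec_Find; infer_instance

-- ===== CLAIM (what is proved, stated in full; the proofs are below) =====
def Claim_equal_Find : Prop := ∀ (arr : List Int) (x : Int) (y : Int), Dom_Find arr x y → Spec_Find arr x y (Find arr x y)

-- ===== LEMMAS AND PROOFS =====

-- the index/value loop over range(len(arr)) is the fold over enumerate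
theorem fold_range_eq_fold_enum (f : Int × Int → Int → Int → Int × Int) :
    ∀ (arr pre : List Int) (init : Int × Int),
    (PySem.List.pyRange (pre.length) ((pre.length + arr.length : Nat)) 1).foldl
        (fun acc k => f acc k (PySem.List.pyGetD (pre ++ arr) k 0)) init
      = (PySem.List.enumerate arr (pre.length : Int)).foldl (fun acc kv => f acc kv.1 kv.2) init := by
  intro arr
  induction arr with
  | nil =>
      intro pre init
      simp [PySem.List.pyRange_one_eq_nil, PySem.List.enumerate]
  | cons a t ih =>
      intro pre init
      simp only [List.length_cons]
      rw [PySem.List.pyRange_one_cons (by push_cast; omega)]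
      rw [PySem.List.enumerate_cons]
      simp only [List.foldl_cons]
      have hget : PySem.List.pyGetD (pre ++ a :: t) (pre.length : Int) 0 = a := by
        rw [PySem.List.pyGetD_natCast]
        simp [List.getD]
      rw [hget]
      have := ih (pre ++ [a]) (f init (pre.length) a)
      simp only [List.length_append, List.length_singleton, List.append_assoc,
        List.singleton_append] at this
      have hcast : ((pre.length : Int) + 1) = ((pre.length + 1 : Nat) : Int) := by push_cast; ring
      have hb : ((pre.length + (t.length + 1) : Nat) : Int) = ((pre.length + 1 + t.length : Nat) : Int) := by
        push_cast; ring
      rw [hcast, hb]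
      exact this

theorem bne_comm_int (a b : Int) : (a != b) = (b != a) := by
  simp [bne, eq_comm]

-- findIdxFrom returns -1 or an index ≥ its start
theorem findIdxFrom_ge (arr : List Int) : ∀ (s : Int) (p : Int → Int → Bool),
    findIdxFrom arr s p = -1 ∨ s ≤ findIdxFrom arr s p := by
  induction arr with
  | nil => intro s p; left; rfl
  | cons a t ih =>
      intro s p
      by_cases h : p s a = true
      · right; simp [findIdxFrom, h]
      · rcases ih (s + 1) p with h1 | h1 <;> simp [findIdxFrom, h, h1]
        · right; omega

-- once i is set it never changes
theorem foldl_i_set (x y : Int) : ∀ (arr : List Int) (s i0 j0 : Int), i0 ≠ -1 →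
    ((PySem.List.enumerate arr s).foldl (fun acc kv => FindStep x y acc kv.1 kv.2) (i0, j0)).1 = i0 := by
  intro arr
  induction arr with
  | nil => intro s i0 j0 h; rfl
  | cons a t ih =>
      intro s i0 j0 h
      rw [PySem.List.enumerate_cons]
      simp only [List.foldl_cons]
      have hstep : FindStep x y (i0, j0) s a = (i0, (FindStep x y (i0, j0) s a).2) := by
        simp [FindStep, show (i0 == -1) = false by simpa using h]
      rw [hstep]
      exact ih (s + 1) i0 _ h

-- once j is set it never changes
theorem foldl_j_set (x y : Int) : ∀ (arr : List Int) (s i0 j0 : Int), j0 ≠ -1 →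
    ((PySem.List.enumerate arr s).foldl (fun acc kv => FindStep x y acc kv.1 kv.2) (i0, j0)).2 = j0 := by
  intro arr
  induction arr with
  | nil => intro s i0 j0 h; rfl
  | cons a t ih =>
      intro s i0 j0 h
      rw [PySem.List.enumerate_cons]
      simp only [List.foldl_cons]
      have hstep : FindStep x y (i0, j0) s a = ((FindStep x y (i0, j0) s a).1, j0) := by
        simp [FindStep, show (j0 == -1) = false by simpa using h]
      rw [hstep]
      exact ih (s + 1) _ j0 h

-- with i unset, the first component computes the first x-index
theorem foldl_i_unset (x y : Int) : ∀ (arr : List Int) (s j0 : Int), 0 ≤ s →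
    ((PySem.List.enumerate arr s).foldl (fun acc kv => FindStep x y acc kv.1 kv.2) (-1, j0)).1
      = findIdxFrom arr s (fun _ v => v == x) := by
  intro arr
  induction arr with
  | nil => intro s j0 hs; rfl
  | cons a t ih =>
      intro s j0 hs
      rw [PySem.List.enumerate_cons]
      simp only [List.foldl_cons]
      by_cases hx : (a == x) = true
      · have hstep : FindStep x y (-1, j0) s a = (s, (FindStep x y (-1, j0) s a).2) := by
          simp [FindStep, hx]
        rw [hstep, foldl_i_set x y t (s+1) s _ (by omega)]
        simp [findIdxFrom, hx]
      · have hstep : FindStep x y (-1, j0) s a = (-1, (FindStep x y (-1, j0) s a).2) := by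
          simp [FindStep, hx]
        rw [hstep]
        rw [ih (s + 1) _ (by omega)]
        simp [findIdxFrom, hx]

-- with i already fixed and j unset, the second component is the first y-index ≠ i0
theorem foldl_j_with_i (x y : Int) : ∀ (arr : List Int) (s i0 : Int), 0 ≤ s → i0 ≠ -1 →
    ((PySem.List.enumerate arr s).foldl (fun acc kv => FindStep x y acc kv.1 kv.2) (i0, -1)).2
      = findIdxFrom arr s (fun k v => v == y && k != i0) := by
  intro arr
  induction arr with
  | nil => intro s i0 hs hi; rfl
  | cons a t ih =>
      intro s i0 hs hi
      rw [PySem.List.enumerate_cons]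
      simp only [List.foldl_cons]
      have hi' : (i0 == -1) = false := by simpa using hi
      by_cases hy : ((a == y) && (s != i0)) = true
      · have hstep : FindStep x y (i0, -1) s a = (i0, s) := by
          simp only [Bool.and_eq_true] at hy
          simp [FindStep, hi', hy.1, bne_comm_int i0 s, hy.2]
        rw [hstep, foldl_j_set x y t (s+1) i0 s (by omega)]
        simp [findIdxFrom, hy]
      · have hstep : FindStep x y (i0, -1) s a = (i0, -1) := by
          by_cases ha : (a == y) = true
          · have hs' : (s != i0) = false := by
              simp only [Bool.and_eq_true] at hy
              cases h : (s != i0) with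
              | false => rfl
              | true => exact absurd ⟨ha, h⟩ hy
            simp [FindStep, hi', ha, bne_comm_int i0 s, hs']
          · simp [FindStep, hi', ha]
        rw [hstep, ih (s + 1) i0 (by omega) hi]
        simp [findIdxFrom, hy]

-- the main invariant: A's fused fold computes B's two searches
theorem main_fold (x y : Int) : ∀ (arr : List Int) (s : Int), 0 ≤ s →
    (PySem.List.enumerate arr s).foldl (fun acc kv => FindStep x y acc kv.1 kv.2) (-1, -1)
      = (findIdxFrom arr s (fun _ v => v == x),
         findIdxFrom arr s (fun k v => v == y && k != findIdxFrom arr s (fun _ v => v == x))) := by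
  intro arr
  induction arr with
  | nil => intro s hs; rfl
  | cons a t ih =>
      intro s hs
      rw [PySem.List.enumerate_cons]
      simp only [List.foldl_cons]
      by_cases hx : (a == x) = true
      · -- i gets set to s; j guard fails at this step (i' = k)
        have hstep : FindStep x y (-1, -1) s a = (s, -1) := by
          simp [FindStep, hx]
        rw [hstep]
        have hfi : findIdxFrom (a :: t) s (fun _ v => v == x) = s := by
          simp [findIdxFrom, hx]
        rw [hfi]
        have h1 := foldl_i_set x y t (s+1) s (-1) (by omega)
        have h2 := foldl_j_with_i x y t (s+1) s (by omega) (by omega)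
        have hj : findIdxFrom (a :: t) s (fun k v => v == y && k != s)
            = findIdxFrom t (s + 1) (fun k v => v == y && k != s) := by
          simp [findIdxFrom]
        rw [hj, Prod.ext_iff]
        exact ⟨h1, h2⟩
      · have hfi : findIdxFrom (a :: t) s (fun _ v => v == x)
            = findIdxFrom t (s + 1) (fun _ v => v == x) := by
          simp [findIdxFrom, hx]
        rw [hfi]
        set fi := findIdxFrom t (s + 1) (fun _ v => v == x) with hfidef
        have hsfi : (s != fi) = true := by
          rcases findIdxFrom_ge t (s + 1) (fun _ v => v == x) with h | h <;>
            · rw [← hfidef] at h; simp; omega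
        by_cases hy : (a == y) = true
        · -- j gets set to s, i stays unset
          have hstep : FindStep x y (-1, -1) s a = (-1, s) := by
            simp [FindStep, hx, hy]
          rw [hstep]
          have h1 := foldl_i_unset x y t (s+1) s (by omega)
          have h2 := foldl_j_set x y t (s+1) (-1) s (by omega)
          have hj : findIdxFrom (a :: t) s (fun k v => v == y && k != fi) = s := by
            simp [findIdxFrom, hy, hsfi]
          rw [hj]
          rw [Prod.ext_iff]
          exact ⟨h1, h2⟩
        · have hstep : FindStep x y (-1, -1) s a = (-1, -1) := by
            simp [FindStep, hx, hy]
          rw [hstep, ih (s + 1) (by omega)]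
          have hj : findIdxFrom (a :: t) s (fun k v => v == y && k != fi)
              = findIdxFrom t (s + 1) (fun k v => v == y && k != fi) := by
            simp [findIdxFrom, hy]
          rw [hj]

-- ===== VERDICT (by name: the statement is the Claim_ definition above) =====
theorem Find_spec : Claim_equal_Find := by
  intro arr x y _
  unfold Spec_Find Find Find_alt
  have hconv := fold_range_eq_fold_enum (fun acc k v => FindStep x y acc k v) arr [] (-1, -1)
  simp only [List.length_nil, List.nil_append, Nat.zero_add, Nat.cast_zero] at hconv
  rw [hconv, main_fold x y arr 0 (by omega)]
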